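-- pv_equiv track=rewrite | github.com/bupi99/ShamirSecretSharing | SM Decrypting.py | decrypt_byte
-- ===== SOURCE A (Python) =====
-- def decrypt_byte(ys,xs,k, p):
--     a0 = 0
--     idx = 0
--     for xj in xs:
--         lj = 1
--         for xm in xs:
--             if xj != xm:
--                 lj *= ((-xm)*pow(xj-xm,-1,p) % p)
--         a0 += lj*ys[idx]
--         idx += 1
--     return a0 % p
-- ===== SOURCE B (Python) =====
-- def decrypt_byte(ys, xs, k, p):
--     # Accumulate the interpolated value at 0 as a single exact fraction S/P mod p
--     # (fraction addition on a (numerator, denominator) state), so only ONE modular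
--     # inverse is taken at the very end instead of one per pair of points.
--     S, P = 0, 1
--     for xj, y in zip(xs, ys):
--         n = d = 1
--         for xm in xs:
--             if xm != xj:
--                 n = n * -xm % p
--                 d = d * (xj - xm) % p
--         S = (S * d + y * n * P) % p
--         P = P * d % p
--     return S * pow(P, -1, p) % p
-- ===== Notes on version B (the rewrite author's own statement) =====
-- stated objective: alternative
-- what changed: B maintains the running result as one exact fraction (numerator, denominator) mod p, folding each Lagrange term in by fraction addition, and takes a single modular inverse at the very end, whereas A takes a modular inverse inside the inner loop for every ordered pair of points and sums unreduced term values.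
import Mathlib
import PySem

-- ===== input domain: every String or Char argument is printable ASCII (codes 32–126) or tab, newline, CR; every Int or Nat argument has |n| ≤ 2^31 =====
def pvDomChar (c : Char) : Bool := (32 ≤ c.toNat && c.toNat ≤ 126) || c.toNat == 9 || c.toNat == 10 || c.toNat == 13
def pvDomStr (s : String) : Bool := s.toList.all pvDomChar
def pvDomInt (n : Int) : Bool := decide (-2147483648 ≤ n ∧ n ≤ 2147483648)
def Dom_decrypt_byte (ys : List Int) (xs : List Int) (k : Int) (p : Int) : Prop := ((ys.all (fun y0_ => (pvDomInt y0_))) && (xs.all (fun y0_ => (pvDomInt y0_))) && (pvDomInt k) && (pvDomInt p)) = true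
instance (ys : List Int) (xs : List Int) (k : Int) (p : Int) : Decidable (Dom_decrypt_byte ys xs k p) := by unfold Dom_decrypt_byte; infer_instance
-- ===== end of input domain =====

-- B folds each Lagrange term into one exact fraction (numerator, denominator) mod p and
-- takes a single modular inverse at the end, instead of A's inverse per ordered pair.

-- Shared hand port of Python's pow(a, -1, p): exact whenever gcd(a, p) = 1 and p ≠ 0
-- (the only inputs Pre_ admits); both sides are the unique residue of the inverse in
-- Python's %-range.
def pyinv (a p : Int) : Int := PySem.Int.mod (Int.gcdA a p) p

-- ===== PORT A =====
-- A's inner loop: lj *= ((-xm) * pow(xj - xm, -1, p) % p) over xm in xs with xj != xm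
def innerL (xs : List Int) (xj p : Int) (lj : Int) : Int :=
  xs.foldl (fun lj xm =>
    if xj ≠ xm then lj * PySem.Int.mod ((-xm) * pyinv (xj - xm) p) p else lj) lj

def decrypt_byte (ys : List Int) (xs : List Int) (k : Int) (p : Int) : Int :=
  let st := xs.foldl (fun (st : Int × Int) xj =>
      (st.1 + innerL xs xj p 1 * PySem.List.pyGetD ys st.2 0, st.2 + 1)) ((0 : Int), (0 : Int))
  PySem.Int.mod st.1 p

-- ===== PORT B =====
-- B's inner loop: n = n * -xm % p; d = d * (xj - xm) % p over xm in xs with xm != xj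
def innerND (xs : List Int) (xj p : Int) (nd : Int × Int) : Int × Int :=
  xs.foldl (fun (nd : Int × Int) xm =>
    if xm ≠ xj then (PySem.Int.mod (nd.1 * (-xm)) p, PySem.Int.mod (nd.2 * (xj - xm)) p) else nd) nd

-- B's outer step: S = (S * d + y * n * P) % p; P = P * d % p
def bStep (xs : List Int) (p : Int) (st : Int × Int) (xy : Int × Int) : Int × Int :=
  let nd := innerND xs xy.1 p (1, 1)
  (PySem.Int.mod (st.1 * nd.2 + xy.2 * nd.1 * st.2) p, PySem.Int.mod (st.2 * nd.2) p)

def decrypt_byte_alt (ys : List Int) (xs : List Int) (k : Int) (p : Int) : Int :=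
  let st := (xs.zip ys).foldl (bStep xs p) ((0 : Int), (1 : Int))
  PySem.Int.mod (st.1 * pyinv st.2 p) p

-- ===== PRECONDITION & SPEC =====
-- Pre_ excludes exactly the inputs on which Python A raises: p = 0 (ZeroDivisionError /
-- pow with modulus 0), ys shorter than xs (IndexError), and a pair of distinct share
-- x-coordinates whose difference is not invertible mod p (ValueError from pow).
def Pre_decrypt_byte (ys : List Int) (xs : List Int) (k : Int) (p : Int) : Prop :=
  p ≠ 0 ∧ xs.length ≤ ys.length ∧
    ∀ xj ∈ xs, ∀ xm ∈ xs, xj ≠ xm → Int.gcd (xj - xm) p = 1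
instance (ys : List Int) (xs : List Int) (k : Int) (p : Int) : Decidable (Pre_decrypt_byte ys xs k p) := by unfold Pre_decrypt_byte; infer_instance

def pvWitness_decrypt_byte : List Int × List Int × Int × Int := ([3, 4], [1, 2], 2, 7)

def Spec_decrypt_byte (ys : List Int) (xs : List Int) (k : Int) (p : Int) (out : Int) : Prop := out = decrypt_byte_alt ys xs k p
instance (ys : List Int) (xs : List Int) (k : Int) (p : Int) (out : Int) : Decidable (Spec_decrypt_byte ys xs k p out) := by unfold Spec_decrypt_byte; infer_instance

-- ===== CLAIM (what is proved, stated in full; the proofs are below) =====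
def Claim_equal_decrypt_byte : Prop := ∀ (ys : List Int) (xs : List Int) (k : Int) (p : Int), Dom_decrypt_byte ys xs k p → Pre_decrypt_byte ys xs k p → Spec_decrypt_byte ys xs k p (decrypt_byte ys xs k p)

-- ===== LEMMAS AND PROOFS =====

-- Python % keeps the value in its congruence class.
theorem pymod_modeq (a p : Int) : Int.ModEq p (PySem.Int.mod a p) a := by
  have h := PySem.Int.floordiv_mul_add_mod a p
  exact (Int.modEq_iff_dvd.mpr ⟨-(PySem.Int.floordiv a p), by linarith⟩).symm

-- Congruent values have the same Python residue (p ≠ 0).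
theorem pymod_congr {a b p : Int} (hp : p ≠ 0) (h : Int.ModEq p a b) :
    PySem.Int.mod a p = PySem.Int.mod b p := by
  have hmod : Int.ModEq p (PySem.Int.mod a p) (PySem.Int.mod b p) :=
    (pymod_modeq a p).trans (h.trans (pymod_modeq b p).symm)
  have hd : p ∣ PySem.Int.mod b p - PySem.Int.mod a p := Int.ModEq.dvd hmod
  rcases lt_or_gt_of_ne hp with hneg | hpos
  · have b1 := PySem.Int.mod_neg_bounds a hneg
    have b2 := PySem.Int.mod_neg_bounds b hneg
    have hz : PySem.Int.mod b p - PySem.Int.mod a p = 0 := by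
      refine Int.eq_zero_of_abs_lt_dvd ((Int.neg_dvd).mpr hd) ?_
      rw [abs_lt]; omega
    omega
  · have a1 := PySem.Int.mod_nonneg a hpos
    have a2 := PySem.Int.mod_lt a hpos
    have b1 := PySem.Int.mod_nonneg b hpos
    have b2 := PySem.Int.mod_lt b hpos
    have hz : PySem.Int.mod b p - PySem.Int.mod a p = 0 := by
      refine Int.eq_zero_of_abs_lt_dvd hd ?_
      rw [abs_lt]; omega
    omega

-- pyinv really inverts: a * pyinv a p ≡ 1 (mod p) when gcd(a, p) = 1.
theorem pyinv_spec {a p : Int} (hg : Int.gcd a p = 1) :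
    Int.ModEq p (a * pyinv a p) 1 := by
  have hb := Int.gcd_eq_gcd_ab a p
  rw [hg] at hb
  have h1 : Int.ModEq p (a * Int.gcdA a p) 1 := by
    refine Int.modEq_iff_dvd.mpr ⟨Int.gcdB a p, ?_⟩
    push_cast at hb
    linarith
  exact (Int.ModEq.mul_left a (pymod_modeq (Int.gcdA a p) p)).trans h1

-- congruence preserves the gcd with the modulus
theorem gcd_congr {a b p : Int} (h : Int.ModEq p a b) : Int.gcd a p = Int.gcd b p := by
  obtain ⟨t, ht⟩ := Int.ModEq.dvd h
  have hb : b = a + p * t := by linarith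
  rw [hb, Int.gcd_add_mul_left_left]

-- Inner-loop invariant: A's lj times B's d stays congruent to B's n, and d stays
-- invertible.
theorem inner_invariant (p xj : Int) :
    ∀ (l : List Int), (∀ xm ∈ l, xj ≠ xm → Int.gcd (xj - xm) p = 1) →
    ∀ (lj num den : Int), Int.ModEq p (lj * den) num → Int.gcd den p = 1 →
      Int.ModEq p (innerL l xj p lj * (innerND l xj p (num, den)).2)
        (innerND l xj p (num, den)).1 ∧ Int.gcd (innerND l xj p (num, den)).2 p = 1 := by
  intro l
  induction l with
  | nil => intro _ lj num den h1 h2; exact ⟨h1, h2⟩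
  | cons xm l ih =>
    intro hco lj num den h1 h2
    have hcotail : ∀ x ∈ l, xj ≠ x → Int.gcd (xj - x) p = 1 :=
      fun x hx hne => hco x (List.mem_cons_of_mem _ hx) hne
    by_cases hx : xj = xm
    · simp only [innerL, innerND, List.foldl_cons, hx, ne_eq, not_true_eq_false, if_false]
      have := ih hcotail lj num den h1 h2
      simpa [innerL, innerND, hx] using this
    · have hgx : Int.gcd (xj - xm) p = 1 := hco xm (List.mem_cons_self) hx
      have hxm : xm ≠ xj := fun e => hx e.symm
      simp only [innerL, innerND, List.foldl_cons, hx, hxm, ne_eq, not_false_eq_true, if_true]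
      set M := PySem.Int.mod ((-xm) * pyinv (xj - xm) p) p with hM
      set num' := PySem.Int.mod (num * (-xm)) p with hnum'
      set den' := PySem.Int.mod (den * (xj - xm)) p with hden'
      have h2' : Int.gcd den' p = 1 := by
        have hcg : Int.gcd den' p = Int.gcd (den * (xj - xm)) p :=
          gcd_congr (pymod_modeq (den * (xj - xm)) p)
        rw [hcg]
        have : ((den * (xj - xm)).natAbs).gcd p.natAbs = 1 := by
          rw [Int.natAbs_mul]
          exact Nat.Coprime.mul_left h2 hgx
        exact this
      have h1' : Int.ModEq p (lj * M * den') num' := by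
        have hm1 : Int.ModEq p (lj * M * den')
            (lj * ((-xm) * pyinv (xj - xm) p) * (den * (xj - xm))) :=
          Int.ModEq.mul (Int.ModEq.mul_left lj (pymod_modeq _ p)) (pymod_modeq _ p)
        have hm2 : lj * ((-xm) * pyinv (xj - xm) p) * (den * (xj - xm))
            = lj * den * ((xj - xm) * pyinv (xj - xm) p) * (-xm) := by ring
        have hm3 : Int.ModEq p (lj * den * ((xj - xm) * pyinv (xj - xm) p) * (-xm))
            (num * 1 * (-xm)) :=
          Int.ModEq.mul (Int.ModEq.mul h1 (pyinv_spec hgx)) (Int.ModEq.refl _)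
        have hm4 : Int.ModEq p (num * 1 * (-xm)) num' := by
          have h := (pymod_modeq (num * (-xm)) p).symm
          have e : num * 1 * (-xm) = num * (-xm) := by ring
          rw [e, hnum']
          exact h
        calc Int.ModEq p (lj * M * den') _ := hm1
          _ ≡ _ [ZMOD p] := by rw [hm2]
          _ ≡ num * 1 * (-xm) [ZMOD p] := hm3
          _ ≡ num' [ZMOD p] := hm4
      have := ih hcotail (lj * M) num' den' h1' h2'
      simpa [innerL, innerND] using this

-- A's indexed outer loop is the plain sum over the zip with ys.
theorem a_fold_eq_zip (xs ys : List Int) (p : Int) :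
    ∀ (l : List Int) (i : Nat) (a0 : Int), i + l.length ≤ ys.length →
      (l.foldl (fun (st : Int × Int) xj =>
          (st.1 + innerL xs xj p 1 * PySem.List.pyGetD ys st.2 0, st.2 + 1)) (a0, (i : Int))).1
        = (l.zip (ys.drop i)).foldl (fun s xy => s + innerL xs xy.1 p 1 * xy.2) a0 := by
  intro l
  induction l with
  | nil => intro i a0 h; simp
  | cons xj l ih =>
    intro i a0 h
    have hi : i < ys.length := by simp at h; omega
    rw [List.drop_eq_getElem_cons hi]
    simp only [List.foldl_cons, List.zip_cons_cons]
    have hget : PySem.List.pyGetD ys (i : Int) 0 = ys[i] := by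
      rw [PySem.List.pyGetD_of_nonneg ys 0 (by positivity)]
      simp [List.getD_eq_getElem?_getD, hi]
    rw [hget]
    have hc : ((i : Int) + 1) = ((i + 1 : Nat) : Int) := by push_cast; ring
    rw [hc]
    exact ih (i + 1) _ (by simp at h ⊢; omega)

-- B's fraction-accumulating outer loop: S stays congruent to (running plain sum) * P,
-- and P stays invertible.
theorem b_loop_invariant (xs : List Int) (p : Int)
    (hco : ∀ xj ∈ xs, ∀ xm ∈ xs, xj ≠ xm → Int.gcd (xj - xm) p = 1) :
    ∀ (zl : List (Int × Int)), (∀ xy ∈ zl, xy.1 ∈ xs) →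
    ∀ (S P T : Int), Int.ModEq p S (T * P) → Int.gcd P p = 1 →
      Int.ModEq p (zl.foldl (bStep xs p) (S, P)).1
        ((zl.foldl (fun t xy => t + innerL xs xy.1 p 1 * xy.2) T)
          * (zl.foldl (bStep xs p) (S, P)).2)
      ∧ Int.gcd (zl.foldl (bStep xs p) (S, P)).2 p = 1 := by
  intro zl
  induction zl with
  | nil => intro _ S P T h1 h2; exact ⟨h1, h2⟩
  | cons xy zl ih =>
    intro hmem S P T h1 h2
    obtain ⟨xj, y⟩ := xy
    have hxj : xj ∈ xs := hmem (xj, y) (List.mem_cons_self)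
    obtain ⟨hLD, hD⟩ := inner_invariant p xj xs
      (fun xm hxm hne => hco xj hxj xm hxm hne) 1 1 1 (by simp) Int.one_gcd
    set N := (innerND xs xj p (1, 1)).1
    set D := (innerND xs xj p (1, 1)).2
    set L := innerL xs xj p 1
    simp only [List.foldl_cons, bStep]
    set S' := PySem.Int.mod (S * D + y * N * P) p with hS'
    set P' := PySem.Int.mod (P * D) p with hP'
    have h2' : Int.gcd P' p = 1 := by
      have hcg : Int.gcd P' p = Int.gcd (P * D) p := gcd_congr (pymod_modeq (P * D) p)
      rw [hcg]
      have : ((P * D).natAbs).gcd p.natAbs = 1 := by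
        rw [Int.natAbs_mul]
        exact Nat.Coprime.mul_left h2 hD
      exact this
    have h1' : Int.ModEq p S' ((T + L * y) * P') := by
      have c1 : Int.ModEq p S' (S * D + y * N * P) := pymod_modeq _ p
      have c2 : Int.ModEq p (S * D + y * N * P) (T * P * D + y * (L * D) * P) :=
        Int.ModEq.add (Int.ModEq.mul h1 (Int.ModEq.refl D))
          (Int.ModEq.mul_right P (Int.ModEq.mul_left y hLD.symm))
      have e : T * P * D + y * (L * D) * P = (T + L * y) * (P * D) := by ring
      have c3 : Int.ModEq p ((T + L * y) * (P * D)) ((T + L * y) * P') :=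
        Int.ModEq.mul_left (T + L * y) (pymod_modeq (P * D) p).symm
      exact c1.trans (c2.trans (by rw [e] at *; exact c3))
    exact ih (fun z hz => hmem z (List.mem_cons_of_mem _ hz)) S' P' (T + L * y) h1' h2'

-- ===== VERDICT (by name: the statement is the Claim_ definition above) =====
theorem decrypt_byte_spec : Claim_equal_decrypt_byte := by
  intro ys xs k p _ hpre
  obtain ⟨hp, hlen, hco⟩ := hpre
  unfold Spec_decrypt_byte
  simp only [decrypt_byte, decrypt_byte_alt]
  have hA := a_fold_eq_zip xs ys p xs 0 0 (by simpa using hlen)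
  simp only [Nat.cast_zero, List.drop_zero] at hA
  rw [hA]
  obtain ⟨hS, hP⟩ := b_loop_invariant xs p hco (xs.zip ys)
    (fun xy hxy => (List.of_mem_zip hxy).1) 0 1 0 (by simp) Int.one_gcd
  set st := (xs.zip ys).foldl (bStep xs p) ((0 : Int), (1 : Int)) with hst
  set Ssum := (xs.zip ys).foldl (fun s xy => s + innerL xs xy.1 p 1 * xy.2) 0 with hSsum
  have hfin : Int.ModEq p (st.1 * pyinv st.2 p) Ssum := by
    have c1 : Int.ModEq p (st.1 * pyinv st.2 p) (Ssum * st.2 * pyinv st.2 p) :=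
      Int.ModEq.mul hS (Int.ModEq.refl _)
    have e : Ssum * st.2 * pyinv st.2 p = Ssum * (st.2 * pyinv st.2 p) := by ring
    have c2 : Int.ModEq p (Ssum * (st.2 * pyinv st.2 p)) Ssum := by
      simpa using Int.ModEq.mul_left Ssum (pyinv_spec hP)
    exact c1.trans (e ▸ c2)
  exact (pymod_congr hp hfin.symm)
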